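-- pv_equiv track=rewrite | github.com/timvantongeren/advent-of-code-2024 | year2024/day15/solution.py | expand_warehouse_lines
-- ===== SOURCE A (Python) =====
-- def expand_warehouse_lines(warehouse_lines: list[str]) -> list[str]:
--     expanded_lines = []
--     for line in warehouse_lines:
--         new_line = line.replace("\n", "")
--         new_line = new_line.replace("#", "##")
--         new_line = new_line.replace("O", "[]")
--         new_line = new_line.replace(".", "..")
--         new_line = new_line.replace("@", "@.")
--         expanded_lines.append(new_line)
--     return expanded_lines
-- ===== SOURCE B (Python) =====
-- def expand_warehouse_lines(warehouse_lines: list[str]) -> list[str]: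
--     table = {"\n": "", "#": "##", "O": "[]", ".": "..", "@": "@."}
--     return ["".join(table.get(c, c) for c in line) for line in warehouse_lines]
-- ===== Notes on version B (the rewrite author's own statement) =====
-- stated objective: idiomatic
-- what changed: Replaces the five sequential str.replace scans per line with a single table-driven per-character pass (dict lookup with identity default) inside a list comprehension.
import Mathlib
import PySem

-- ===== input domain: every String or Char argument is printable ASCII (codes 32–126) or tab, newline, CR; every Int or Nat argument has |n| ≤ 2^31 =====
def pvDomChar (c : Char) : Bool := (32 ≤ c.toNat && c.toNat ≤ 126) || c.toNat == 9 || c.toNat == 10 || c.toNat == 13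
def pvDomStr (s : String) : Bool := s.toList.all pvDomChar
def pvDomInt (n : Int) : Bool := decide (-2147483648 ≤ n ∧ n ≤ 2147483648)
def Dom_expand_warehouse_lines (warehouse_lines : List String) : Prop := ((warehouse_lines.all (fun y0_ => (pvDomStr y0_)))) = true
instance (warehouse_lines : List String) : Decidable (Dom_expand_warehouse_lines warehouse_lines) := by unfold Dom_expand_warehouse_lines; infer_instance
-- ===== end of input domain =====

-- B swaps the five sequential str.replace scans per line for one table-driven per-character pass (idiomatic; return value only, no mutation).

-- ===== PORT A =====
def expand_warehouse_lines (warehouse_lines : List String) : List String :=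
  warehouse_lines.foldl (fun expanded_lines line =>
    let n1 := PySem.Str.replace line "\n" ""
    let n2 := PySem.Str.replace n1 "#" "##"
    let n3 := PySem.Str.replace n2 "O" "[]"
    let n4 := PySem.Str.replace n3 "." ".."
    let n5 := PySem.Str.replace n4 "@" "@."
    expanded_lines ++ [n5]) []

-- ===== PORT B =====
def pvTable : PySem.Dict Char String :=
  ((((PySem.Dict.empty.insert '\n' "").insert '#' "##").insert 'O' "[]").insert '.' "..").insert '@' "@."

def expand_warehouse_lines_alt (warehouse_lines : List String) : List String :=
  warehouse_lines.map (fun line =>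
    PySem.Str.join "" (line.toList.map (fun c => PySem.Dict.getD pvTable c (String.ofList [c]))))

-- ===== PRECONDITION & SPEC =====
def Spec_expand_warehouse_lines (warehouse_lines : List String) (out : List String) : Prop := out = expand_warehouse_lines_alt warehouse_lines
instance (warehouse_lines : List String) (out : List String) : Decidable (Spec_expand_warehouse_lines warehouse_lines out) := by unfold Spec_expand_warehouse_lines; infer_instance

-- ===== CLAIM (what is proved, stated in full; the proofs are below) =====
def Claim_equal_expand_warehouse_lines : Prop := ∀ (warehouse_lines : List String), Dom_expand_warehouse_lines warehouse_lines → Spec_expand_warehouse_lines warehouse_lines (expand_warehouse_lines warehouse_lines)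

-- ===== LEMMAS AND PROOFS =====

-- the per-character expansion both programs realise
def pvTbl (c : Char) : List Char :=
  if c = '\n' then [] else if c = '#' then ['#', '#'] else if c = 'O' then ['[', ']']
  else if c = '.' then ['.', '.'] else if c = '@' then ['@', '.'] else [c]

-- a single-character replace is a flatMap (loop invariant of Chars.replace.go)
lemma pv_go_single (o : Char) (new : List Char) (s : List Char) :
    ∀ (fuel : Nat) (acc : List Char), s.length ≤ fuel →
    PySem.Chars.replace.go [o] new fuel s acc
      = acc.reverse ++ s.flatMap (fun c => if c = o then new else [c]) := by
  induction s with
  | nil =>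
      intro fuel acc _
      cases fuel <;> simp [PySem.Chars.replace.go]
  | cons c t ih =>
      intro fuel acc h
      cases fuel with
      | zero => simp at h
      | succ f =>
        rw [PySem.Chars.replace.go.eq_def]
        simp only [List.isPrefixOf, List.length_cons] at *
        by_cases hc : o = c
        · subst hc
          simp only [BEq.rfl, Bool.true_and, if_pos]
          simp only [List.length_nil, List.drop_succ_cons, List.drop_zero]
          rw [ih f _ (by omega)]
          simp [List.flatMap_cons]
        · have : (o == c) = false := by simp [hc]
          simp only [this, Bool.false_and, if_neg Bool.false_ne_true]
          rw [ih f _ (by omega)]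
          rw [List.flatMap_cons, if_neg (fun h : c = o => hc h.symm)]; simp

lemma pv_replace_single (s : List Char) (o : Char) (new : List Char) :
    PySem.Chars.replace s [o] new = s.flatMap (fun c => if c = o then new else [c]) := by
  rw [PySem.Chars.replace]
  simp only [List.isEmpty_cons, if_neg Bool.false_ne_true]
  simpa using pv_go_single o new s s.length [] le_rfl

-- A's five chained replaces on one line, fused to the table pass
lemma pv_chain (s : List Char) :
    PySem.Chars.replace (PySem.Chars.replace (PySem.Chars.replace (PySem.Chars.replace
      (PySem.Chars.replace s ['\n'] []) ['#'] ['#', '#']) ['O'] ['[', ']'])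
        ['.'] ['.', '.']) ['@'] ['@', '.'] = s.flatMap pvTbl := by
  simp only [pv_replace_single, List.flatMap_assoc]
  refine List.flatMap_congr (fun c _ => ?_)
  by_cases h1 : c = '\n'; · subst h1; decide
  by_cases h2 : c = '#'; · subst h2; decide
  by_cases h3 : c = 'O'; · subst h3; decide
  by_cases h4 : c = '.'; · subst h4; decide
  by_cases h5 : c = '@'; · subst h5; decide
  simp [pvTbl, h1, h2, h3, h4, h5]

-- B's table lookup produces the same per-character expansion
lemma pv_table_lookup (c : Char) :
    (PySem.Dict.getD pvTable c (String.ofList [c])).toList = pvTbl c := by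
  by_cases h1 : c = '\n'; · subst h1; decide
  by_cases h2 : c = '#'; · subst h2; decide
  by_cases h3 : c = 'O'; · subst h3; decide
  by_cases h4 : c = '.'; · subst h4; decide
  by_cases h5 : c = '@'; · subst h5; decide
  rw [pvTable]
  rw [PySem.Dict.getD_insert_of_ne _ _ _ h5, PySem.Dict.getD_insert_of_ne _ _ _ h4,
    PySem.Dict.getD_insert_of_ne _ _ _ h3, PySem.Dict.getD_insert_of_ne _ _ _ h2,
    PySem.Dict.getD_insert_of_ne _ _ _ h1]
  simp [pvTbl, h1, h2, h3, h4, h5, PySem.Dict.getD, PySem.Dict.empty, PySem.Dict.get?]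

-- ''.join with empty separator is concatenation
lemma pv_join_nil_flatten (p : List (List Char)) : PySem.Chars.join [] p = p.flatten := by
  induction p with
  | nil => rfl
  | cons a t ih =>
      cases t with
      | nil => simp [PySem.Chars.join, List.intercalate]
      | cons b u => rw [PySem.Chars.join_cons_cons, ih]; simp

lemma pv_line (line : String) :
    PySem.Str.replace (PySem.Str.replace (PySem.Str.replace (PySem.Str.replace
      (PySem.Str.replace line "\n" "") "#" "##") "O" "[]") "." "..") "@" "@."
    = PySem.Str.join "" (line.toList.map (fun c => PySem.Dict.getD pvTable c (String.ofList [c]))) := by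
  apply String.toList_injective
  simp only [PySem.Str.toList_replace, PySem.Str.toList_join]
  have e0 : ("" : String).toList = [] := rfl
  have e1 : ("\n" : String).toList = ['\n'] := rfl
  have e2 : ("#" : String).toList = ['#'] := rfl
  have e3 : ("##" : String).toList = ['#', '#'] := rfl
  have e4 : ("O" : String).toList = ['O'] := rfl
  have e5 : ("[]" : String).toList = ['[', ']'] := rfl
  have e6 : ("." : String).toList = ['.'] := rfl
  have e7 : (".." : String).toList = ['.', '.'] := rfl
  have e8 : ("@" : String).toList = ['@'] := rfl
  have e9 : ("@." : String).toList = ['@', '.'] := rfl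
  rw [e0, e1, e2, e3, e4, e5, e6, e7, e8, e9, pv_chain, pv_join_nil_flatten, List.map_map]
  simp only [Function.comp_def]
  rw [List.map_congr_left (fun c _ => pv_table_lookup c)]
  simp [List.flatMap_def]

-- ===== VERDICT (by name: the statement is the Claim_ definition above) =====
theorem expand_warehouse_lines_spec : Claim_equal_expand_warehouse_lines := by
  intro warehouse_lines _
  unfold Spec_expand_warehouse_lines expand_warehouse_lines expand_warehouse_lines_alt
  rw [PySem.List.foldl_append_singleton_eq_map]
  exact List.map_congr_left (fun line _ => pv_line line)
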